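-- pv_equiv track=rewrite | github.com/nayoung16/CodingTest | 프로그래머스/2/468373. 바이러스 파이프/바이러스 파이프.py | solution
-- ===== SOURCE A (Python) =====
-- from collections import deque
-- from itertools import product
--
-- def solution(n, infection, edges, k):
--     graph = [[] for _ in range(n+1)]
--     start_pipe_types = set()
--     for x,y,t in edges:
--         graph[x].append((y,t))
--         graph[y].append((x,t))
--         start_pipe_types.add(t)
--
--     polluted = [False for _ in range(n+1)]
--     infected_nodes = [infection]
--     # 오염시키는 함수
--     def bfs(infected_nodes, pipe_type):
--         q = deque()
--         for node in infected_nodes: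
--             q.append(node)
--             polluted[node] = True
--         polluted_count = 0
--         while q:
--             cur = q.popleft()
--             for nxt, nxt_pipe_type in graph[cur]:
--                 if nxt_pipe_type == pipe_type and not polluted[nxt]:
--                     polluted[nxt] = True
--                     polluted_count += 1
--                     q.append(nxt)
--                     infected_nodes.append(nxt)
--         return polluted_count
--
--
--     max_count = 0
--     for seq in product(list(start_pipe_types), repeat=k):
--         polluted = [False for _ in range(n+1)]
--         polluted[infection] = True
--         infected_nodes = [infection]
--         count = 1
--         for p in seq:
--             count += bfs(infected_nodes, p)
--         max_count = max(max_count, count)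
--
--     return max_count
-- ===== SOURCE B (Python) =====
-- def solution(n, infection, edges, k):
--     # Different algorithm: each contamination wave is computed by saturating
--     # edge relaxation (scan the raw edge list until a full pass changes nothing)
--     # instead of a deque BFS over an adjacency list, and the sequences are
--     # explored by a DFS over the k levels that shares common prefixes instead
--     # of itertools.product; the node count is read off as sum(polluted).
--     types = {t for _, _, t in edges}
--
--     def close(polluted, pipe_type):
--         region = polluted[:]
--         changed = True
--         while changed:
--             changed = False
--             for x, y, t in edges:
--                 if t == pipe_type and region[x] != region[y]:
--                     region[x] = True
--                     region[y] = True
--                     changed = True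
--         return region
--
--     best = 0
--
--     def dfs(level, polluted):
--         nonlocal best
--         if level == k:
--             best = max(best, sum(polluted))
--             return
--         for t in types:
--             dfs(level + 1, close(polluted, t))
--
--     polluted = [False] * (n + 1)
--     polluted[infection] = True
--     dfs(0, polluted)
--     return best
-- ===== Notes on version B (the rewrite author's own statement) =====
-- stated objective: alternative
-- what changed: Replaced the deque-BFS-over-an-adjacency-list run from scratch for every itertools.product sequence by fixpoint edge relaxation over the raw edge list for each wave, driven by a prefix-sharing DFS over the k levels, with the count read off as sum(polluted) at the leaves.
-- outside the precondition, e.g. on solution(2, 5, [], 1): A returns 0, B raises IndexError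
import Mathlib
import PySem

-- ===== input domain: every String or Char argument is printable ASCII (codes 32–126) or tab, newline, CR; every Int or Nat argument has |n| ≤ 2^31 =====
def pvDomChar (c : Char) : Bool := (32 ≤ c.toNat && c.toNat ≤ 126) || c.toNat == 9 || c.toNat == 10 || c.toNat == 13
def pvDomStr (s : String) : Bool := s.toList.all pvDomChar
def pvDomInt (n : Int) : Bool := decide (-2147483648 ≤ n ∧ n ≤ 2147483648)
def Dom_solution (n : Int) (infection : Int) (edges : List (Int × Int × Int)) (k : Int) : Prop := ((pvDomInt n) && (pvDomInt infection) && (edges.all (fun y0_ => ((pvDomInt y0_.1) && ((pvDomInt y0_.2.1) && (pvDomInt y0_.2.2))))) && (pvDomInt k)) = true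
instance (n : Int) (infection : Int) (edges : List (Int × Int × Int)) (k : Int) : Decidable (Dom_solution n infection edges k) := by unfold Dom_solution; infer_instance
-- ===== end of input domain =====

-- B replaces A's per-sequence deque-BFS over an adjacency list by fixpoint edge relaxation over
-- the raw edge list for each wave, driven by a prefix-sharing DFS over the k levels (objective:
-- alternative algorithm; no speed claim). Fuel arguments in both ports are totality guards only.

-- ===== PORT A =====
-- graph building: adjacency list + pipe-type set, as in A's first loop
def pvGraph (n : Int) (edges : List (Int × Int × Int)) : List (List (Int × Int)) × PySem.Set Int :=
  edges.foldl (fun st e =>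
    let g1 := PySem.List.pySetD st.1 e.1 (PySem.List.pyGetD st.1 e.1 [] ++ [(e.2.1, e.2.2)])
    let g2 := PySem.List.pySetD g1 e.2.1 (PySem.List.pyGetD g1 e.2.1 [] ++ [(e.1, e.2.2)])
    (g2, PySem.Set.add st.2 e.2.2))
    ((List.range (n + 1).toNat).map (fun _ => []), PySem.Set.ofList [])

-- polluted = [False for _ in range(n+1)]; polluted[infection] = True
def pvInitP (n : Int) (infection : Int) : List Bool :=
  PySem.List.pySetD ((List.range (n + 1).toNat).map (fun _ => false)) infection true

-- one neighbour check of A's BFS inner for-loop; state = (polluted, queue, infected_nodes, count)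
def pvStepA (t : Int) (st : List Bool × List Int × List Int × Int) (nb : Int × Int) :
    List Bool × List Int × List Int × Int :=
  if nb.2 = t ∧ PySem.List.pyGetD st.1 nb.1 true = false then
    (PySem.List.pySetD st.1 nb.1 true, st.2.1 ++ [nb.1], st.2.2.1 ++ [nb.1], st.2.2.2 + 1)
  else st

-- A's while-loop over the deque (popleft + scan of graph[cur]); fuel is a totality guard only
def pvBfsLoopA (g : List (List (Int × Int))) (t : Int) :
    Nat → List Int → List Bool → List Int → Int → List Bool × List Int × Int
  | 0, _, p, inf, cnt => (p, inf, cnt)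
  | _ + 1, [], p, inf, cnt => (p, inf, cnt)
  | fuel + 1, cur :: rest, p, inf, cnt =>
    let st := (PySem.List.pyGetD g cur []).foldl (pvStepA t) (p, rest, inf, cnt)
    pvBfsLoopA g t fuel st.2.1 st.1 st.2.2.1 st.2.2.2

-- A's bfs: enqueue + mark every already-infected node, then run the loop; returns new count too
def pvBfsA (g : List (List (Int × Int))) (t : Int) (p : List Bool) (inf : List Int) :
    List Bool × List Int × Int :=
  let p0 := inf.foldl (fun p node => PySem.List.pySetD p node true) p
  pvBfsLoopA g t (inf.length + 2 * p0.length + 1) inf p0 inf 0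

-- 'count += bfs(infected_nodes, p)' threading A's per-sequence state (polluted, infected, count)
def pvApplyA (g : List (List (Int × Int))) (s : List Bool × List Int × Int) (t : Int) :
    List Bool × List Int × Int :=
  let r := pvBfsA g t s.1 s.2.1
  (r.1, r.2.1, s.2.2 + r.2.2)

-- itertools.product(l, repeat=m) in product order
def pvProduct (l : List Int) : Nat → List (List Int)
  | 0 => [[]]
  | m + 1 => l.flatMap (fun t => (pvProduct l m).map (t :: ·))

def solution (n : Int) (infection : Int) (edges : List (Int × Int × Int)) (k : Int) : Int :=
  let gt := pvGraph n edges
  (pvProduct gt.2 k.toNat).foldl (fun mx seq =>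
      let st := seq.foldl (pvApplyA gt.1) (pvInitP n infection, [infection], 1)
      max mx st.2.2) 0

-- ===== PORT B =====
-- one full relaxation pass over the raw edge list; state = (region, changed)
def pvPass (t : Int) (edges : List (Int × Int × Int)) (p : List Bool) : List Bool × Bool :=
  edges.foldl (fun st e =>
    if e.2.2 = t ∧ PySem.List.pyGetD st.1 e.1 true ≠ PySem.List.pyGetD st.1 e.2.1 true then
      (PySem.List.pySetD (PySem.List.pySetD st.1 e.1 true) e.2.1 true, true)
    else st) (p, false)

-- 'while changed' saturation loop; fuel (each changed pass marks a new cell) is a totality guard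
def pvCloseLoop (t : Int) (edges : List (Int × Int × Int)) : Nat → List Bool → List Bool
  | 0, p => p
  | fuel + 1, p =>
    let st := pvPass t edges p
    if st.2 then pvCloseLoop t edges fuel st.1 else st.1

def pvCloseB (t : Int) (edges : List (Int × Int × Int)) (p : List Bool) : List Bool :=
  pvCloseLoop t edges (p.length + 1) p

-- B's dfs over the remaining levels r = k - level; best is the running maximum
def pvDfsB (edges : List (Int × Int × Int)) (types : List Int) :
    Nat → Int → List Bool → Int
  | 0, best, p => max best (p.count true : Int)
  | r + 1, best, p =>
    types.foldl (fun best t => pvDfsB edges types r best (pvCloseB t edges p)) best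

def solution_alt (n : Int) (infection : Int) (edges : List (Int × Int × Int)) (k : Int) : Int :=
  let types := PySem.Set.ofList (edges.map (fun e => e.2.2))
  pvDfsB edges types k.toNat 0
    (PySem.List.pySetD (List.replicate (n + 1).toNat false) infection true)

-- ===== PRECONDITION & SPEC =====
-- Pre_ excludes: k < 0 (A raises ValueError in product), edge endpoints outside Python's index
-- range for the length-(n+1) lists (A raises IndexError building the graph), and out-of-range
-- infection — there A raises IndexError except in the accidental corner 'no pipe types and
-- k > 0', where A skips its initialisation and returns 0 while B raises IndexError (see cites).
def Pre_solution (n : Int) (infection : Int) (edges : List (Int × Int × Int)) (k : Int) : Prop :=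
  0 ≤ k ∧ PySem.Raise.InRange (n + 1).toNat infection ∧
  ∀ e ∈ edges, PySem.Raise.InRange (n + 1).toNat e.1 ∧ PySem.Raise.InRange (n + 1).toNat e.2.1
instance (n : Int) (infection : Int) (edges : List (Int × Int × Int)) (k : Int) :
    Decidable (Pre_solution n infection edges k) := by unfold Pre_solution; infer_instance

def pvWitness_solution : Int × Int × (List (Int × Int × Int)) × Int := (2, 0, [(0, 1, 5), (1, 2, 5)], 2)

def Spec_solution (n : Int) (infection : Int) (edges : List (Int × Int × Int)) (k : Int) (out : Int) : Prop := out = solution_alt n infection edges k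
instance (n : Int) (infection : Int) (edges : List (Int × Int × Int)) (k : Int) (out : Int) : Decidable (Spec_solution n infection edges k out) := by unfold Spec_solution; infer_instance

-- ===== CLAIM (what is proved, stated in full; the proofs are below) =====
def Claim_equal_solution : Prop := ∀ (n : Int) (infection : Int) (edges : List (Int × Int × Int)) (k : Int), Dom_solution n infection edges k → Pre_solution n infection edges k → Spec_solution n infection edges k (solution n infection edges k)

-- ===== LEMMAS AND PROOFS =====

-- Both waves compute the same thing: the closure of the marked CELLS of the length-L polluted
-- array under the type-t edge relation on cells. pvRel/pvReach/pvGood name that characterisation;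
-- each side is shown pvGood, and pvGood arrays are unique.

-- cell c and cell d are joined by a type-t pipe (cells = canonical indices of Python labels)
def pvRel (edges : List (Int × Int × Int)) (t : Int) (L : Nat) (c d : Nat) : Prop :=
  ∃ e ∈ edges, e.2.2 = t ∧
    ((PySem.List.pyIdx? L e.1 = some c ∧ PySem.List.pyIdx? L e.2.1 = some d) ∨
     (PySem.List.pyIdx? L e.1 = some d ∧ PySem.List.pyIdx? L e.2.1 = some c))

inductive pvReach (edges : List (Int × Int × Int)) (t : Int) (L : Nat) (p0 : List Bool) : Nat → Prop
  | base (c : Nat) : p0.getD c false = true → pvReach edges t L p0 c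
  | step (c d : Nat) : pvReach edges t L p0 c → pvRel edges t L c d → pvReach edges t L p0 d

def pvMono (p q : List Bool) : Prop := ∀ c, p.getD c false = true → q.getD c false = true

def pvSound (edges : List (Int × Int × Int)) (t : Int) (L : Nat) (p0 q : List Bool) : Prop :=
  ∀ c, q.getD c false = true → pvReach edges t L p0 c

def pvClosed (edges : List (Int × Int × Int)) (t : Int) (L : Nat) (q : List Bool) : Prop :=
  ∀ c d, pvRel edges t L c d → q.getD c false = true → q.getD d false = true

def pvGood (edges : List (Int × Int × Int)) (t : Int) (L : Nat) (p0 q : List Bool) : Prop :=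
  q.length = L ∧ pvMono p0 q ∧ pvClosed edges t L q ∧ pvSound edges t L p0 q

-- all edge endpoints are Python-valid indices for length L (from Pre_)
def pvEOK (edges : List (Int × Int × Int)) (L : Nat) : Prop :=
  ∀ e ∈ edges, PySem.Raise.InRange L e.1 ∧ PySem.Raise.InRange L e.2.1

-- the invariant threaded between waves: count = number of marked cells, and infected_nodes
-- names exactly the marked cells
def pvOut (L : Nat) (p : List Bool) (inf : List Int) (cnt : Int) : Prop :=
  p.length = L ∧ cnt = (p.count true : Int) ∧
  (∀ x ∈ inf, ∃ c, PySem.List.pyIdx? L x = some c ∧ p.getD c false = true) ∧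
  (∀ c, p.getD c false = true → ∃ x ∈ inf, PySem.List.pyIdx? L x = some c)

-- ---- small bridges between label-level PySem primitives and cell-level getD/set ----

theorem pvIdx_lt {n : Nat} {i : Int} {j : Nat} (h : PySem.List.pyIdx? n i = some j) : j < n := by
  unfold PySem.List.pyIdx? at h
  split_ifs at h <;> simp_all <;> omega

theorem pvGetD_cell {α : Type} {p : List α} {x : Int} {c : Nat} {d : α}
    (h : PySem.List.pyIdx? p.length x = some c) :
    PySem.List.pyGetD p x d = p.getD c d := by
  simp [PySem.List.pyGetD, PySem.List.pyGet?, h, List.getD_eq_getElem?_getD]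

theorem pvSetD_cell {α : Type} {p : List α} {x : Int} {c : Nat} {v : α}
    (h : PySem.List.pyIdx? p.length x = some c) :
    PySem.List.pySetD p x v = p.set c v := by
  simp [PySem.List.pySetD, PySem.List.pySet?, h]

theorem pvIdx_of_inRange {L : Nat} {x : Int} (h : PySem.Raise.InRange L x) :
    ∃ c, PySem.List.pyIdx? L x = some c := by
  unfold PySem.Raise.InRange at h
  unfold PySem.List.pyIdx?
  split_ifs <;> first | exact ⟨_, rfl⟩ | (exfalso; omega)

theorem pvInRange_of_getD_false {p : List Bool} {i : Int}
    (h : PySem.List.pyGetD p i true = false) :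
    ∃ c, PySem.List.pyIdx? p.length i = some c ∧ p.getD c false = false := by
  unfold PySem.List.pyGetD PySem.List.pyGet? at h
  cases hi : PySem.List.pyIdx? p.length i with
  | none => rw [hi] at h; simp at h
  | some c =>
    rw [hi] at h
    have hc := pvIdx_lt hi
    refine ⟨c, rfl, ?_⟩
    rw [List.getD_eq_getElem?_getD]
    simpa [List.getElem?_eq_getElem hc] using h

theorem pvCount_set_true {p : List Bool} {c : Nat} (h : c < p.length) :
    (p.set c true).count true
      = if p.getD c false = true then p.count true else p.count true + 1 := by
  have hg : p.getD c false = p[c] := by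
    simp [List.getD_eq_getElem?_getD, List.getElem?_eq_getElem h]
  rw [List.count_set h, hg]
  cases hpc : p[c] with
  | false => simp
  | true =>
    have hmem : true ∈ p := by have := List.getElem_mem h; rwa [hpc] at this
    have hpos : 0 < p.count true := List.count_pos_iff.mpr hmem
    simp
    omega

theorem pvGetD_set {α : Type} {p : List α} {c i : Nat} {v d : α} :
    (p.set c v).getD i d = if i = c ∧ c < p.length then v else p.getD i d := by
  simp only [List.getD_eq_getElem?_getD, List.getElem?_set]
  split_ifs with h1 h2 h3 h3 <;> simp_all

-- ---- uniqueness of a pvGood array ----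

theorem pvReach_marked {edges : List (Int × Int × Int)} {t : Int} {L : Nat} {p0 q : List Bool}
    (hm : pvMono p0 q) (hc : pvClosed edges t L q) {c : Nat}
    (h : pvReach edges t L p0 c) : q.getD c false = true := by
  induction h with
  | base c h => exact hm c h
  | step c d _ hrel ih => exact hc c d hrel ih

theorem pvGood_unique {edges : List (Int × Int × Int)} {t : Int} {L : Nat} {p0 q1 q2 : List Bool}
    (h1 : pvGood edges t L p0 q1) (h2 : pvGood edges t L p0 q2) : q1 = q2 := by
  obtain ⟨hl1, hm1, hc1, hs1⟩ := h1
  obtain ⟨hl2, hm2, hc2, hs2⟩ := h2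
  apply List.ext_getElem (hl1.trans hl2.symm)
  intro i hi1 hi2
  have g1 : q1.getD i false = q1[i] := by
    simp [List.getD_eq_getElem?_getD, List.getElem?_eq_getElem hi1]
  have g2 : q2.getD i false = q2[i] := by
    simp [List.getD_eq_getElem?_getD, List.getElem?_eq_getElem hi2]
  cases hb1 : q1[i] with
  | true =>
    have := pvReach_marked hm2 hc2 (hs1 i (by rw [g1, hb1]))
    rw [g2] at this
    rw [this]
  | false =>
    cases hb2 : q2[i] with
    | false => rfl
    | true =>
      have := pvReach_marked hm1 hc1 (hs2 i (by rw [g2, hb2]))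
      rw [g1, hb1] at this
      exact absurd this (by simp)

-- ---- characterisation of A's adjacency list ----

theorem pvGraphStep_eq {g : List (List (Int × Int))} {e : Int × Int × Int} {c1 c2 : Nat}
    (h1 : PySem.List.pyIdx? g.length e.1 = some c1)
    (h2 : PySem.List.pyIdx? g.length e.2.1 = some c2) :
    PySem.List.pySetD (PySem.List.pySetD g e.1 (PySem.List.pyGetD g e.1 [] ++ [(e.2.1, e.2.2)]))
        e.2.1 (PySem.List.pyGetD (PySem.List.pySetD g e.1 (PySem.List.pyGetD g e.1 []
          ++ [(e.2.1, e.2.2)])) e.2.1 [] ++ [(e.1, e.2.2)])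
      = (g.set c1 (g.getD c1 [] ++ [(e.2.1, e.2.2)])).set c2
          (((g.set c1 (g.getD c1 [] ++ [(e.2.1, e.2.2)]))).getD c2 [] ++ [(e.1, e.2.2)]) := by
  have hg1 : PySem.List.pySetD g e.1 (PySem.List.pyGetD g e.1 [] ++ [(e.2.1, e.2.2)])
      = g.set c1 (g.getD c1 [] ++ [(e.2.1, e.2.2)]) := by
    rw [pvGetD_cell h1, pvSetD_cell h1]
  have hl : (g.set c1 (g.getD c1 [] ++ [(e.2.1, e.2.2)])).length = g.length := by simp
  simp only [hg1]
  rw [pvGetD_cell (by rw [hl]; exact h2), pvSetD_cell (by rw [hl]; exact h2)]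

def pvGStep (st : List (List (Int × Int)) × PySem.Set Int) (e : Int × Int × Int) :
    List (List (Int × Int)) × PySem.Set Int :=
  let g1 := PySem.List.pySetD st.1 e.1 (PySem.List.pyGetD st.1 e.1 [] ++ [(e.2.1, e.2.2)])
  let g2 := PySem.List.pySetD g1 e.2.1 (PySem.List.pyGetD g1 e.2.1 [] ++ [(e.1, e.2.2)])
  (g2, PySem.Set.add st.2 e.2.2)

theorem pvGraph_eq_foldl_pvGStep (n : Int) (edges : List (Int × Int × Int)) :
    pvGraph n edges
      = edges.foldl pvGStep ((List.range (n + 1).toNat).map (fun _ => []), PySem.Set.ofList []) :=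
  rfl

theorem pvGraph_aux (L : Nat) (es : List (Int × Int × Int)) :
    ∀ (g : List (List (Int × Int))) (s : PySem.Set Int), g.length = L → pvEOK es L →
      ((es.foldl pvGStep (g, s)).1.length = L ∧
       ∀ c : Nat, (es.foldl pvGStep (g, s)).1.getD c []
          = g.getD c [] ++ es.flatMap (fun e =>
              (if PySem.List.pyIdx? L e.1 = some c then [(e.2.1, e.2.2)] else []) ++
              (if PySem.List.pyIdx? L e.2.1 = some c then [(e.1, e.2.2)] else []))) := by
  induction es with
  | nil => intro g s hl _; exact ⟨hl, fun c => by simp⟩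
  | cons e es ih =>
    intro g s hl he
    obtain ⟨c1, hc1⟩ := pvIdx_of_inRange (he e (by simp)).1
    obtain ⟨c2, hc2⟩ := pvIdx_of_inRange (he e (by simp)).2
    have hc1' : PySem.List.pyIdx? g.length e.1 = some c1 := by rw [hl]; exact hc1
    have hc2' : PySem.List.pyIdx? g.length e.2.1 = some c2 := by rw [hl]; exact hc2
    have hlt1 : c1 < L := hl ▸ pvIdx_lt hc1'
    have hlt2 : c2 < L := hl ▸ pvIdx_lt hc2'
    have hstep : pvGStep (g, s) e
        = ((g.set c1 (g.getD c1 [] ++ [(e.2.1, e.2.2)])).set c2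
            ((g.set c1 (g.getD c1 [] ++ [(e.2.1, e.2.2)])).getD c2 [] ++ [(e.1, e.2.2)]),
           PySem.Set.add s e.2.2) := by
      exact Prod.ext (pvGraphStep_eq hc1' hc2') rfl
    simp only [List.foldl_cons, hstep]
    set g2 := (g.set c1 (g.getD c1 [] ++ [(e.2.1, e.2.2)])).set c2
        ((g.set c1 (g.getD c1 [] ++ [(e.2.1, e.2.2)])).getD c2 [] ++ [(e.1, e.2.2)]) with hg2
    have hl2 : g2.length = L := by simp [hg2, hl]
    obtain ⟨ihl, ihg⟩ := ih g2 (PySem.Set.add s e.2.2) hl2 (fun x hx => he x (by simp [hx]))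
    refine ⟨ihl, fun c => ?_⟩
    rw [ihg c]
    have hbase : g2.getD c []
        = g.getD c [] ++
          ((if PySem.List.pyIdx? L e.1 = some c then [(e.2.1, e.2.2)] else []) ++
           (if PySem.List.pyIdx? L e.2.1 = some c then [(e.1, e.2.2)] else [])) := by
      have e1c : (PySem.List.pyIdx? L e.1 = some c) = (c = c1) := by
        rw [hc1]; simp [eq_comm]
      have e2c : (PySem.List.pyIdx? L e.2.1 = some c) = (c = c2) := by
        rw [hc2]; simp [eq_comm]
      rw [hg2, pvGetD_set, pvGetD_set, pvGetD_set]
      simp only [e1c, e2c, List.length_set, hl]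
      by_cases h2 : c = c2 <;> by_cases h1 : c = c1 <;>
        simp_all [List.append_assoc]
    rw [hbase]
    simp [List.flatMap_cons, List.append_assoc]

theorem pvGraph_length (n : Int) (edges : List (Int × Int × Int))
    (he : pvEOK edges (n + 1).toNat) :
    (pvGraph n edges).1.length = (n + 1).toNat := by
  rw [pvGraph_eq_foldl_pvGStep]
  exact (pvGraph_aux (n + 1).toNat edges _ (PySem.Set.ofList []) (by simp) he).1

theorem pvGraph_getD (n : Int) (edges : List (Int × Int × Int))
    (he : pvEOK edges (n + 1).toNat) (c : Nat) :
    (pvGraph n edges).1.getD c []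
      = edges.flatMap (fun e =>
          (if PySem.List.pyIdx? (n + 1).toNat e.1 = some c then [(e.2.1, e.2.2)] else []) ++
          (if PySem.List.pyIdx? (n + 1).toNat e.2.1 = some c then [(e.1, e.2.2)] else [])) := by
  have h := (pvGraph_aux (n + 1).toNat edges
      ((List.range (n + 1).toNat).map (fun _ => [])) (PySem.Set.ofList [])
      (by simp) he).2 c
  rw [pvGraph_eq_foldl_pvGStep, h]
  have hz : ((List.range (n + 1).toNat).map
      (fun _ => ([] : List (Int × Int)))).getD c [] = [] := by
    simp [List.getD_eq_getElem?_getD]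
  rw [hz, List.nil_append]

theorem pvGraph_types (n : Int) (edges : List (Int × Int × Int)) :
    (pvGraph n edges).2 = PySem.Set.ofList (edges.map (fun e => e.2.2)) := by
  have aux : ∀ (es : List (Int × Int × Int)) (g : List (List (Int × Int))) (s : PySem.Set Int),
      (es.foldl pvGStep (g, s)).2 = es.foldl (fun s e => PySem.Set.add s e.2.2) s := by
    intro es
    induction es with
    | nil => intro g s; rfl
    | cons e es ih => intro g s; simp only [List.foldl_cons]; exact ih _ _
  rw [pvGraph_eq_foldl_pvGStep, aux]
  simp only [PySem.Set.ofList_eq_foldl, List.foldl_map]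
  rfl

-- ---- more label/cell bridges ----

theorem pvGetD_none {α : Type} {p : List α} {x : Int} {d : α}
    (h : PySem.List.pyIdx? p.length x = none) : PySem.List.pyGetD p x d = d := by
  simp [PySem.List.pyGetD, PySem.List.pyGet?, h]

theorem pvSetD_self_of_true {p : List Bool} {x : Int}
    (h : PySem.List.pyGetD p x true = true) :
    PySem.List.pySetD p x true = p := by
  cases hx : PySem.List.pyIdx? p.length x with
  | none => simp [PySem.List.pySetD, PySem.List.pySet?, hx]
  | some c =>
    have hc := pvIdx_lt hx
    rw [pvSetD_cell hx]
    rw [pvGetD_cell hx, List.getD_eq_getElem?_getD, List.getElem?_eq_getElem hc] at h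
    simp only [Option.getD_some] at h
    rw [← h]
    exact List.set_getElem_self hc

theorem pvMarked_label {L : Nat} {p : List Bool} {x : Int} {c : Nat}
    (hp : p.length = L) (hx : PySem.List.pyIdx? L x = some c) :
    PySem.List.pyGetD p x true = true ↔ p.getD c false = true := by
  rw [pvGetD_cell (by rw [hp]; exact hx)]
  have hc : c < p.length := by rw [hp]; exact pvIdx_lt hx
  rw [List.getD_eq_getElem?_getD, List.getD_eq_getElem?_getD, List.getElem?_eq_getElem hc]
  simp

theorem pvMono_label {L : Nat} {p q : List Bool} {x : Int}
    (hp : p.length = L) (hq : q.length = L)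
    (hm : pvMono p q) (h : PySem.List.pyGetD p x true = true) :
    PySem.List.pyGetD q x true = true := by
  cases hx : PySem.List.pyIdx? L x with
  | none => exact pvGetD_none (by rw [hq]; exact hx)
  | some c => exact (pvMarked_label hq hx).mpr (hm c ((pvMarked_label hp hx).mp h))

theorem pvRel_symm {edges : List (Int × Int × Int)} {t : Int} {L : Nat} {c d : Nat}
    (h : pvRel edges t L c d) : pvRel edges t L d c := by
  obtain ⟨e, he, ht, h | h⟩ := h
  · exact ⟨e, he, ht, Or.inr h⟩
  · exact ⟨e, he, ht, Or.inl h⟩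

theorem pvMark2_count {p : List Bool} {c1 c2 : Nat}
    (h1 : c1 < p.length) (h2 : c2 < p.length)
    (hne : p.getD c1 false ≠ p.getD c2 false) :
    ((p.set c1 true).set c2 true).count true = p.count true + 1 := by
  have hcc : c1 ≠ c2 := fun h => hne (h ▸ rfl)
  have hl1 : (p.set c1 true).length = p.length := by simp
  have h2' : c2 < (p.set c1 true).length := by omega
  rw [pvCount_set_true h2', pvCount_set_true h1, pvGetD_set]
  cases hb1 : p.getD c1 false with
  | false =>
    have hb2 : p.getD c2 false = true := by
      cases hb2 : p.getD c2 false
      · rw [hb1, hb2] at hne; exact absurd rfl hne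
      · rfl
    rw [List.getD_eq_getElem?_getD] at hb2
    simp [hb2, hcc.symm, h1]
  | true =>
    have hb2 : p.getD c2 false = false := by
      cases hb2 : p.getD c2 false
      · rfl
      · rw [hb1, hb2] at hne; exact absurd rfl hne
    rw [List.getD_eq_getElem?_getD] at hb2
    simp [hb2, hcc.symm, h1]

-- ---- membership form of the adjacency-list characterisation ----

theorem pvG_mem1 {n : Int} {edges : List (Int × Int × Int)} {t : Int}
    (he : pvEOK edges (n + 1).toNat) {c : Nat} {nb : Int × Int}
    (hmem : nb ∈ (pvGraph n edges).1.getD c []) (ht : nb.2 = t) :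
    ∃ d, PySem.List.pyIdx? (n + 1).toNat nb.1 = some d ∧ d < (n + 1).toNat ∧
      pvRel edges t (n + 1).toNat c d := by
  rw [pvGraph_getD n edges he c] at hmem
  obtain ⟨e, hee, hin⟩ := List.mem_flatMap.mp hmem
  rcases List.mem_append.mp hin with hin | hin
  · by_cases hc : PySem.List.pyIdx? (n + 1).toNat e.1 = some c
    · rw [if_pos hc] at hin
      simp only [List.mem_singleton] at hin
      subst hin
      simp only at ht
      obtain ⟨d, hd⟩ := pvIdx_of_inRange (he e hee).2
      exact ⟨d, hd, pvIdx_lt hd, ⟨e, hee, ht, Or.inl ⟨hc, hd⟩⟩⟩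
    · rw [if_neg hc] at hin; simp at hin
  · by_cases hc : PySem.List.pyIdx? (n + 1).toNat e.2.1 = some c
    · rw [if_pos hc] at hin
      simp only [List.mem_singleton] at hin
      subst hin
      simp only at ht
      obtain ⟨d, hd⟩ := pvIdx_of_inRange (he e hee).1
      exact ⟨d, hd, pvIdx_lt hd, ⟨e, hee, ht, Or.inr ⟨hd, hc⟩⟩⟩
    · rw [if_neg hc] at hin; simp at hin

theorem pvG_mem2 {n : Int} {edges : List (Int × Int × Int)} {t : Int}
    (he : pvEOK edges (n + 1).toNat) {c d : Nat}
    (hrel : pvRel edges t (n + 1).toNat c d) :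
    ∃ nb ∈ (pvGraph n edges).1.getD c [], nb.2 = t ∧
      PySem.List.pyIdx? (n + 1).toNat nb.1 = some d := by
  obtain ⟨e, hee, ht, hor⟩ := hrel
  rw [pvGraph_getD n edges he c]
  rcases hor with ⟨h1, h2⟩ | ⟨h1, h2⟩
  · refine ⟨(e.2.1, e.2.2), ?_, ht, h2⟩
    exact List.mem_flatMap.mpr ⟨e, hee, List.mem_append.mpr (Or.inl (by rw [if_pos h1]; simp))⟩
  · refine ⟨(e.1, e.2.2), ?_, ht, h1⟩
    exact List.mem_flatMap.mpr ⟨e, hee, List.mem_append.mpr (Or.inr (by rw [if_pos h2]; simp))⟩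

-- ---- A's BFS: invariants through the inner fold and the queue loop ----

-- loop-state invariants: lengths, monotonicity/soundness wrt the wave-start array p0,
-- queue cells marked, polluted_count tracks the number of marks, infected_nodes ↔ marks
def pvInvA (edges : List (Int × Int × Int)) (t : Int) (L : Nat) (p0 : List Bool)
    (st : List Bool × List Int × List Int × Int) : Prop :=
  st.1.length = L ∧ pvMono p0 st.1 ∧ pvSound edges t L p0 st.1 ∧
  (∀ x ∈ st.2.1, ∃ c, PySem.List.pyIdx? L x = some c ∧ st.1.getD c false = true) ∧
  st.2.2.2 = (st.1.count true : Int) - (p0.count true : Int) ∧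
  (∀ x ∈ st.2.2.1, ∃ c, PySem.List.pyIdx? L x = some c ∧ st.1.getD c false = true) ∧
  (∀ c, st.1.getD c false = true → ∃ x ∈ st.2.2.1, PySem.List.pyIdx? L x = some c)

theorem pvFoldA_inv (edges : List (Int × Int × Int)) (t : Int) (L : Nat) (p0 : List Bool) :
    ∀ (nbs : List (Int × Int)) (st : List Bool × List Int × List Int × Int),
    (∀ nb ∈ nbs, nb.2 = t → ∃ d, PySem.List.pyIdx? L nb.1 = some d ∧ d < L ∧
        pvReach edges t L p0 d) →
    pvInvA edges t L p0 st →
    pvInvA edges t L p0 (nbs.foldl (pvStepA t) st) ∧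
    (∃ ex, (nbs.foldl (pvStepA t) st).2.1 = st.2.1 ++ ex) ∧
    (∀ nb ∈ nbs, nb.2 = t →
        PySem.List.pyGetD (nbs.foldl (pvStepA t) st).1 nb.1 true = true) ∧
    (nbs.foldl (pvStepA t) st).2.1.length + 2 * st.1.count true
      ≤ st.2.1.length + 2 * (nbs.foldl (pvStepA t) st).1.count true ∧
    pvMono st.1 (nbs.foldl (pvStepA t) st).1 ∧
    (∀ c, (nbs.foldl (pvStepA t) st).1.getD c false = true →
        st.1.getD c false = true ∨ ∃ x ∈ (nbs.foldl (pvStepA t) st).2.1,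
          PySem.List.pyIdx? L x = some c) := by
  intro nbs
  induction nbs with
  | nil =>
    intro st _ hinv
    exact ⟨hinv, ⟨[], by simp⟩, by simp, by simp, fun c h => h, fun c h => Or.inl h⟩
  | cons nb nbs ih =>
    intro st hn hinv
    obtain ⟨hlen, hmono, hsound, hq, hcnt, hiv, hic⟩ := hinv
    by_cases hcond : nb.2 = t ∧ PySem.List.pyGetD st.1 nb.1 true = false
    · -- the neighbour is newly marked and enqueued
      obtain ⟨c, hc, hcf⟩ := pvInRange_of_getD_false hcond.2
      rw [hlen] at hc
      obtain ⟨d, hd, hdL, hreach⟩ := hn nb (by simp) hcond.1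
      have hcd : c = d := by rw [hc] at hd; exact Option.some.inj hd
      subst hcd
      have hcL : c < st.1.length := by omega
      have hstep : pvStepA t st nb
          = (PySem.List.pySetD st.1 nb.1 true, st.2.1 ++ [nb.1], st.2.2.1 ++ [nb.1],
             st.2.2.2 + 1) := by
        simp [pvStepA, hcond]
      have hset : PySem.List.pySetD st.1 nb.1 true = st.1.set c true :=
        pvSetD_cell (by rw [hlen]; exact hc)
      have hget : ∀ i, (st.1.set c true).getD i false
          = if i = c then true else st.1.getD i false := by
        intro i
        rw [pvGetD_set]
        by_cases hi : i = c <;> simp [hi, hcL]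
      have hinv' : pvInvA edges t L p0
          (st.1.set c true, st.2.1 ++ [nb.1], st.2.2.1 ++ [nb.1], st.2.2.2 + 1) := by
        refine ⟨by simp [hlen], ?_, ?_, ?_, ?_, ?_, ?_⟩
        · intro i hi
          rw [hget]
          by_cases h : i = c
          · simp [h]
          · rw [if_neg h]; exact hmono i hi
        · intro i hi
          rw [hget] at hi
          by_cases h : i = c
          · subst h; exact hreach
          · rw [if_neg h] at hi; exact hsound i hi
        · intro x hx
          rcases List.mem_append.mp hx with hx | hx
          · obtain ⟨cx, hcx, hmx⟩ := hq x hx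
            refine ⟨cx, hcx, ?_⟩
            rw [hget]
            by_cases h : cx = c
            · simp [h]
            · rw [if_neg h]; exact hmx
          · have : x = nb.1 := by simpa using hx
            subst this
            exact ⟨c, hc, by rw [hget]; simp⟩
        · have : (st.1.set c true).count true = st.1.count true + 1 := by
            rw [pvCount_set_true hcL]
            rw [hcf]
            simp
          simp only [this, hcnt]
          push_cast
          ring
        · intro x hx
          rcases List.mem_append.mp hx with hx | hx
          · obtain ⟨cx, hcx, hmx⟩ := hiv x hx
            refine ⟨cx, hcx, ?_⟩
            rw [hget]
            by_cases h : cx = c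
            · simp [h]
            · rw [if_neg h]; exact hmx
          · have : x = nb.1 := by simpa using hx
            subst this
            exact ⟨c, hc, by rw [hget]; simp⟩
        · intro i hi
          rw [hget] at hi
          by_cases h : i = c
          · subst h; exact ⟨nb.1, by simp, hc⟩
          · rw [if_neg h] at hi
            obtain ⟨x, hx, hcx⟩ := hic i hi
            exact ⟨x, by simp [hx], hcx⟩
      have hfold : (nb :: nbs).foldl (pvStepA t) st
          = nbs.foldl (pvStepA t)
              (st.1.set c true, st.2.1 ++ [nb.1], st.2.2.1 ++ [nb.1], st.2.2.2 + 1) := by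
        rw [List.foldl_cons, hstep, hset]
      obtain ⟨ihinv, ⟨ex, hex⟩, ihpost, ihpot, ihmono, ihnew⟩ :=
        ih (st.1.set c true, st.2.1 ++ [nb.1], st.2.2.1 ++ [nb.1], st.2.2.2 + 1)
          (fun x hx hxt => hn x (by simp [hx]) hxt) hinv'
      rw [hfold]
      have hmono1 : pvMono st.1 (st.1.set c true) := by
        intro i hi
        rw [hget]
        by_cases h : i = c
        · simp [h]
        · rw [if_neg h]; exact hi
      have hcount1 : (st.1.set c true).count true = st.1.count true + 1 := by
        rw [pvCount_set_true hcL, hcf]; simp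
      refine ⟨ihinv, ⟨[nb.1] ++ ex, by rw [hex]; simp⟩, ?_, ?_, ?_, ?_⟩
      · intro x hx hxt
        rcases List.mem_cons.mp hx with hx | hx
        · subst hx
          have hm1 : PySem.List.pyGetD (st.1.set c true) x.1 true = true := by
            refine (pvMarked_label (by simp [hlen]) hc).mpr ?_
            rw [hget]; simp
          exact pvMono_label (by simp [hlen]) ihinv.1 ihmono hm1
        · exact ihpost x hx hxt
      · simp only [hcount1] at ihpot
        simp only [hex]
        simp only [hex] at ihpot
        simp only [List.length_append, List.length_cons, List.length_nil] at *
        omega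
      · exact fun i hi => ihmono i (hmono1 i hi)
      · intro i hi
        rcases ihnew i hi with hi' | hw
        · rw [hget] at hi'
          by_cases h : i = c
          · subst h
            refine Or.inr ⟨nb.1, ?_, hc⟩
            rw [hex]; simp
          · rw [if_neg h] at hi'; exact Or.inl hi'
        · exact Or.inr hw
    · -- nothing happens at this neighbour
      have hstep : pvStepA t st nb = st := by simp [pvStepA, hcond]
      have hfold : (nb :: nbs).foldl (pvStepA t) st = nbs.foldl (pvStepA t) st := by
        rw [List.foldl_cons, hstep]
      obtain ⟨ihinv, hex, ihpost, ihpot, ihmono, ihnew⟩ :=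
        ih st (fun x hx hxt => hn x (by simp [hx]) hxt)
          ⟨hlen, hmono, hsound, hq, hcnt, hiv, hic⟩
      rw [hfold]
      refine ⟨ihinv, hex, ?_, ihpot, ihmono, ihnew⟩
      intro x hx hxt
      rcases List.mem_cons.mp hx with hx | hx
      · subst hx
        have hm : PySem.List.pyGetD st.1 x.1 true = true := by
          rcases Bool.eq_false_or_eq_true (PySem.List.pyGetD st.1 x.1 true) with h | h
          · exact h
          · exact absurd ⟨hxt, h⟩ hcond
        exact pvMono_label hlen ihinv.1 ihmono hm
      · exact ihpost x hx hxt

theorem pvCount_mono : ∀ {p q : List Bool}, p.length = q.length →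
    (∀ c, p.getD c false = true → q.getD c false = true) →
    p.count true ≤ q.count true := by
  intro p
  induction p with
  | nil => intro q _ _; simp
  | cons a p ih =>
    intro q hl hm
    cases q with
    | nil => simp at hl
    | cons b q =>
      have h0 : a = true → b = true := by
        intro h; have := hm 0 (by simpa using h); simpa using this
      have htl : p.count true ≤ q.count true := by
        refine ih (by simpa using hl) (fun c h => ?_)
        have := hm (c + 1) (by simpa using h)
        simpa using this
      cases a with
      | false => cases b <;> simp <;> omega
      | true => simp [h0 rfl]; omega

theorem pvLoopA_good {edges : List (Int × Int × Int)} {t : Int} {L : Nat}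
    {g : List (List (Int × Int))} (p0 : List Bool)
    (hgl : g.length = L)
    (hg1 : ∀ (c : Nat) (nb : Int × Int), nb ∈ g.getD c [] → nb.2 = t →
        ∃ d, PySem.List.pyIdx? L nb.1 = some d ∧ d < L ∧ pvRel edges t L c d)
    (hg2 : ∀ (c d : Nat), pvRel edges t L c d →
        ∃ nb ∈ g.getD c [], nb.2 = t ∧ PySem.List.pyIdx? L nb.1 = some d) :
    ∀ (fuel : Nat) (q : List Int) (p : List Bool) (inf : List Int) (cnt : Int),
    pvInvA edges t L p0 (p, q, inf, cnt) →
    (∀ c, p.getD c false = true →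
        (∀ d, pvRel edges t L c d → p.getD d false = true) ∨
        ∃ x ∈ q, PySem.List.pyIdx? L x = some c) →
    q.length + 2 * (L - p.count true) ≤ fuel →
    pvGood edges t L p0 (pvBfsLoopA g t fuel q p inf cnt).1 ∧
    pvInvA edges t L p0
      ((pvBfsLoopA g t fuel q p inf cnt).1, [],
       (pvBfsLoopA g t fuel q p inf cnt).2.1, (pvBfsLoopA g t fuel q p inf cnt).2.2) := by
  intro fuel
  induction fuel with
  | zero =>
    intro q p inf cnt hinv hv hpot
    have hq : q = [] := List.eq_nil_of_length_eq_zero (by omega)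
    subst hq
    rw [pvBfsLoopA]
    obtain ⟨hlen, hmono, hsound, _, hcnt, hiv, hic⟩ := hinv
    refine ⟨⟨hlen, hmono, ?_, hsound⟩, hlen, hmono, hsound, by simp, hcnt, hiv, hic⟩
    intro c d hrel hc
    rcases hv c hc with h | h
    · exact h d hrel
    · simp at h
  | succ fuel ihf =>
    intro q p inf cnt hinv hv hpot
    cases q with
    | nil =>
      rw [pvBfsLoopA]
      obtain ⟨hlen, hmono, hsound, _, hcnt, hiv, hic⟩ := hinv
      refine ⟨⟨hlen, hmono, ?_, hsound⟩, hlen, hmono, hsound, by simp, hcnt, hiv, hic⟩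
      intro c d hrel hc
      rcases hv c hc with h | h
      · exact h d hrel
      · simp at h
    | cons cur rest =>
      obtain ⟨hlen, hmono, hsound, hq, hcnt, hiv, hic⟩ := hinv
      obtain ⟨cc, hcc, hccm⟩ := hq cur (by simp)
      have hnbs : PySem.List.pyGetD g cur [] = g.getD cc [] :=
        pvGetD_cell (by rw [hgl]; exact hcc)
      have hreachcc : pvReach edges t L p0 cc := hsound cc hccm
      have hn : ∀ nb ∈ g.getD cc [], nb.2 = t →
          ∃ d, PySem.List.pyIdx? L nb.1 = some d ∧ d < L ∧ pvReach edges t L p0 d := by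
        intro nb hnb hnt
        obtain ⟨d, hd, hdL, hrel⟩ := hg1 cc nb hnb hnt
        exact ⟨d, hd, hdL, pvReach.step cc d hreachcc hrel⟩
      have hinv0 : pvInvA edges t L p0 (p, rest, inf, cnt) :=
        ⟨hlen, hmono, hsound, fun x hx => hq x (by simp [hx]), hcnt, hiv, hic⟩
      obtain ⟨finv, ⟨ex, hex⟩, hpost, hpot2, hfm, hnew⟩ :=
        pvFoldA_inv edges t L p0 (g.getD cc []) (p, rest, inf, cnt) hn hinv0
      rw [pvBfsLoopA]
      simp only [hnbs]
      set st := (g.getD cc []).foldl (pvStepA t) (p, rest, inf, cnt) with hst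
      have hstlen : st.1.length = L := finv.1
      have hv' : ∀ c, st.1.getD c false = true →
          (∀ d, pvRel edges t L c d → st.1.getD d false = true) ∨
          ∃ x ∈ st.2.1, PySem.List.pyIdx? L x = some c := by
        intro c hc
        rcases hnew c hc with hold | hw
        · rcases hv c hold with h | h
          · exact Or.inl (fun d hrel => hfm d (h d hrel))
          · obtain ⟨x, hx, hxc⟩ := h
            rcases List.mem_cons.mp hx with hx | hx
            · subst hx
              have hceq : c = cc := by rw [hxc] at hcc; exact Option.some.inj hcc
              subst hceq
              refine Or.inl (fun d hrel => ?_)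
              obtain ⟨nb, hnb, hnt, hnd⟩ := hg2 c d hrel
              have := hpost nb hnb hnt
              exact (pvMarked_label hstlen hnd).mp this
            · exact Or.inr ⟨x, by rw [hex]; exact List.mem_append_left ex hx, hxc⟩
        · exact Or.inr hw
      have hcle : st.1.count true ≤ L := by
        have := List.count_le_length (l := st.1) (a := true)
        omega
      have hcle0 : p.count true ≤ st.1.count true := by
        refine pvCount_mono ?_ (fun c h => hfm c h)
        rw [hstlen, hlen]
      have hpot' : st.2.1.length + 2 * (L - st.1.count true) ≤ fuel := by
        dsimp only at hpot2
        have hc0 : p.count true ≤ L := by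
          have := List.count_le_length (l := p) (a := true)
          omega
        simp only [List.length_cons] at hpot
        omega
      exact ihf st.2.1 st.1 st.2.2.1 st.2.2.2 finv hv' hpot'

-- ---- B's relaxation: invariants through one pass and the saturation loop ----

def pvPStep (t : Int) (st : List Bool × Bool) (e : Int × Int × Int) : List Bool × Bool :=
  if e.2.2 = t ∧ PySem.List.pyGetD st.1 e.1 true ≠ PySem.List.pyGetD st.1 e.2.1 true then
    (PySem.List.pySetD (PySem.List.pySetD st.1 e.1 true) e.2.1 true, true)
  else st

theorem pvPass_eq (t : Int) (edges : List (Int × Int × Int)) (p : List Bool) :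
    pvPass t edges p = edges.foldl (pvPStep t) (p, false) := rfl

theorem pvGetD_true_false {p : List Bool} {c : Nat} (h : c < p.length) :
    p.getD c true = p.getD c false := by
  rw [List.getD_eq_getElem?_getD, List.getD_eq_getElem?_getD, List.getElem?_eq_getElem h]
  simp

theorem pvFoldB_inv (edges : List (Int × Int × Int)) (t : Int) (L : Nat) (p0 : List Bool) :
    ∀ (es : List (Int × Int × Int)) (r : List Bool) (b : Bool),
    (∀ e ∈ es, e ∈ edges) → pvEOK es L → r.length = L →
    pvSound edges t L p0 r →
    (es.foldl (pvPStep t) (r, b)).1.length = L ∧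
    pvSound edges t L p0 (es.foldl (pvPStep t) (r, b)).1 ∧
    pvMono r (es.foldl (pvPStep t) (r, b)).1 ∧
    (b = true → (es.foldl (pvPStep t) (r, b)).2 = true) ∧
    ((es.foldl (pvPStep t) (r, b)).2 = b ∨
      r.count true + 1 ≤ (es.foldl (pvPStep t) (r, b)).1.count true) ∧
    ((es.foldl (pvPStep t) (r, b)).2 = false →
      (es.foldl (pvPStep t) (r, b)).1 = r ∧
      ∀ e ∈ es, e.2.2 = t →
        PySem.List.pyGetD r e.1 true = PySem.List.pyGetD r e.2.1 true) := by
  intro es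
  induction es with
  | nil =>
    intro r b _ _ hl hs
    exact ⟨hl, hs, fun c h => h, fun h => h, Or.inl rfl, fun _ => ⟨rfl, by simp⟩⟩
  | cons e es ih =>
    intro r b hsub he hl hs
    by_cases hcond : e.2.2 = t ∧
        PySem.List.pyGetD r e.1 true ≠ PySem.List.pyGetD r e.2.1 true
    · -- this pipe relaxes: both endpoints become marked, changed := True
      obtain ⟨c1, hc1⟩ := pvIdx_of_inRange (he e (by simp)).1
      obtain ⟨c2, hc2⟩ := pvIdx_of_inRange (he e (by simp)).2
      have hc1L : c1 < L := pvIdx_lt hc1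
      have hc2L : c2 < L := pvIdx_lt hc2
      have hv1 : PySem.List.pyGetD r e.1 true = r.getD c1 false := by
        rw [pvGetD_cell (by rw [hl]; exact hc1)]
        exact pvGetD_true_false (by omega)
      have hv2 : PySem.List.pyGetD r e.2.1 true = r.getD c2 false := by
        rw [pvGetD_cell (by rw [hl]; exact hc2)]
        exact pvGetD_true_false (by omega)
      have hne : r.getD c1 false ≠ r.getD c2 false := by
        rw [← hv1, ← hv2]; exact hcond.2
      have hrel : pvRel edges t L c1 c2 :=
        ⟨e, hsub e (by simp), hcond.1, Or.inl ⟨hc1, hc2⟩⟩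
      have hreach : pvReach edges t L p0 c1 ∧ pvReach edges t L p0 c2 := by
        cases hb1 : r.getD c1 false with
        | true =>
          have h1 := hs c1 hb1
          exact ⟨h1, pvReach.step c1 c2 h1 hrel⟩
        | false =>
          have hb2 : r.getD c2 false = true := by
            cases hb2 : r.getD c2 false
            · rw [hb1, hb2] at hne; exact absurd rfl hne
            · rfl
          have h2 := hs c2 hb2
          exact ⟨pvReach.step c2 c1 h2 (pvRel_symm hrel), h2⟩
      have hsA : PySem.List.pySetD r e.1 true = r.set c1 true :=
        pvSetD_cell (p := r) (by rw [hl]; exact hc1)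
      have hsB : PySem.List.pySetD (r.set c1 true) e.2.1 true
          = (r.set c1 true).set c2 true :=
        pvSetD_cell (p := r.set c1 true) (by rw [List.length_set, hl]; exact hc2)
      have hset : PySem.List.pySetD (PySem.List.pySetD r e.1 true) e.2.1 true
          = (r.set c1 true).set c2 true := by
        rw [hsA, hsB]
      have hstep : pvPStep t (r, b) e = ((r.set c1 true).set c2 true, true) := by
        simp only [pvPStep, if_pos hcond, hset]
      have hget : ∀ i, ((r.set c1 true).set c2 true).getD i false
          = if i = c2 then true else if i = c1 then true else r.getD i false := by
        intro i
        rw [pvGetD_set, pvGetD_set]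
        by_cases h2 : i = c2
        · simp [h2, hl, hc2L]
        · by_cases h1 : i = c1 <;> simp [h1, h2, hl, hc1L]
      have hl' : ((r.set c1 true).set c2 true).length = L := by simp [hl]
      have hs' : pvSound edges t L p0 ((r.set c1 true).set c2 true) := by
        intro i hi
        rw [hget] at hi
        by_cases h2 : i = c2
        · subst h2; exact hreach.2
        · rw [if_neg h2] at hi
          by_cases h1 : i = c1
          · subst h1; exact hreach.1
          · rw [if_neg h1] at hi; exact hs i hi
      have hm' : pvMono r ((r.set c1 true).set c2 true) := by
        intro i hi
        rw [hget]
        by_cases h2 : i = c2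
        · simp [h2]
        · rw [if_neg h2]
          by_cases h1 : i = c1
          · simp [h1]
          · rw [if_neg h1]; exact hi
      have hcnt' : ((r.set c1 true).set c2 true).count true = r.count true + 1 :=
        pvMark2_count (by omega) (by omega) hne
      obtain ⟨ihl, ihs, ihm, ihflag, ihcnt, _⟩ :=
        ih ((r.set c1 true).set c2 true) true
          (fun x hx => hsub x (by simp [hx])) (fun x hx => he x (by simp [hx])) hl' hs'
      rw [List.foldl_cons, hstep]
      refine ⟨ihl, ihs, fun i hi => ihm i (hm' i hi), fun _ => ihflag rfl, ?_, ?_⟩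
      · refine Or.inr ?_
        have : ((r.set c1 true).set c2 true).count true
            ≤ (es.foldl (pvPStep t) ((r.set c1 true).set c2 true, true)).1.count true :=
          pvCount_mono (by rw [ihl, hl']) ihm
        omega
      · intro hfalse
        exact absurd (ihflag rfl) (by rw [hfalse]; simp)
    · -- nothing changes at this pipe
      have hstep : pvPStep t (r, b) e = (r, b) := by simp [pvPStep, hcond]
      obtain ⟨ihl, ihs, ihm, ihflag, ihcnt, ihunch⟩ :=
        ih r b (fun x hx => hsub x (by simp [hx])) (fun x hx => he x (by simp [hx])) hl hs
      rw [List.foldl_cons, hstep]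
      refine ⟨ihl, ihs, ihm, ihflag, ihcnt, fun hfalse => ?_⟩
      obtain ⟨hr, hes⟩ := ihunch hfalse
      refine ⟨hr, fun x hx hxt => ?_⟩
      rcases List.mem_cons.mp hx with hx | hx
      · subst hx
        by_contra hneq
        exact hcond ⟨hxt, hneq⟩
      · exact hes x hx hxt

theorem pvCloseLoop_good (edges : List (Int × Int × Int)) (t : Int) (L : Nat) (p0 : List Bool)
    (he : pvEOK edges L) :
    ∀ (fuel : Nat) (p : List Bool), p.length = L → pvMono p0 p → pvSound edges t L p0 p →
    L - p.count true < fuel →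
    pvGood edges t L p0 (pvCloseLoop t edges fuel p) := by
  intro fuel
  induction fuel with
  | zero => intro p _ _ _ hpot; omega
  | succ fuel ihf =>
    intro p hl hm hs hpot
    obtain ⟨zl, zs, zm, _, zcnt, zunch⟩ :=
      pvFoldB_inv edges t L p0 edges p false (fun e h => h) he hl hs
    rw [pvCloseLoop]
    rw [← pvPass_eq] at zl zs zm zcnt zunch
    cases hflag : (pvPass t edges p).2 with
    | true =>
      simp only [if_true]
      have hinc : p.count true + 1 ≤ (pvPass t edges p).1.count true := by
        rcases zcnt with h | h
        · rw [hflag] at h; simp at h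
        · exact h
      have hcle : (pvPass t edges p).1.count true ≤ L := by
        have := List.count_le_length (l := (pvPass t edges p).1) (a := true)
        omega
      exact ihf (pvPass t edges p).1 zl (fun c h => zm c (hm c h)) zs (by omega)
    | false =>
      simp only [Bool.false_eq_true, if_false]
      obtain ⟨hr, hes⟩ := zunch hflag
      rw [hr]
      refine ⟨hl, hm, ?_, hs⟩
      intro c d hrel hc
      obtain ⟨e, hee, hte, hor⟩ := hrel
      have heq := hes e hee hte
      rcases hor with ⟨h1, h2⟩ | ⟨h1, h2⟩
      · rw [pvGetD_cell (by rw [hl]; exact h1), pvGetD_cell (by rw [hl]; exact h2),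
           pvGetD_true_false (by rw [hl]; exact pvIdx_lt h1),
           pvGetD_true_false (by rw [hl]; exact pvIdx_lt h2)] at heq
        rw [← heq]; exact hc
      · rw [pvGetD_cell (by rw [hl]; exact h1), pvGetD_cell (by rw [hl]; exact h2),
           pvGetD_true_false (by rw [hl]; exact pvIdx_lt h1),
           pvGetD_true_false (by rw [hl]; exact pvIdx_lt h2)] at heq
        rw [heq]; exact hc

theorem pvCloseB_good (edges : List (Int × Int × Int)) (t : Int) (L : Nat) (p : List Bool)
    (he : pvEOK edges L) (hl : p.length = L) :
    pvGood edges t L p (pvCloseB t edges p) := by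
  unfold pvCloseB
  refine pvCloseLoop_good edges t L p he (p.length + 1) p hl (fun c h => h)
    (fun c h => pvReach.base c h) ?_
  omega

-- ---- the two waves agree, and the sequence/level recursions agree ----

theorem pvMark_noop : ∀ (inf : List Int) (p : List Bool),
    (∀ x ∈ inf, PySem.List.pyGetD p x true = true) →
    inf.foldl (fun p node => PySem.List.pySetD p node true) p = p := by
  intro inf
  induction inf with
  | nil => intro p _; rfl
  | cons a l ih =>
    intro p h
    simp only [List.foldl_cons]
    rw [pvSetD_self_of_true (h a (by simp))]
    exact ih p (fun x hx => h x (by simp [hx]))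

theorem pvWaveA (n : Int) (edges : List (Int × Int × Int)) (t : Int)
    (he : pvEOK edges (n + 1).toNat) (p : List Bool) (inf : List Int) (cnt : Int)
    (hout : pvOut (n + 1).toNat p inf cnt) :
    (pvApplyA (pvGraph n edges).1 (p, inf, cnt) t).1 = pvCloseB t edges p ∧
    pvOut (n + 1).toNat (pvApplyA (pvGraph n edges).1 (p, inf, cnt) t).1
      (pvApplyA (pvGraph n edges).1 (p, inf, cnt) t).2.1
      (pvApplyA (pvGraph n edges).1 (p, inf, cnt) t).2.2 := by
  obtain ⟨hl, hcnt, hiv, hic⟩ := hout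
  have hmark : ∀ x ∈ inf, PySem.List.pyGetD p x true = true := by
    intro x hx
    obtain ⟨c, hc, hm⟩ := hiv x hx
    exact (pvMarked_label hl hc).mpr hm
  have happ : pvApplyA (pvGraph n edges).1 (p, inf, cnt) t
      = ((pvBfsA (pvGraph n edges).1 t p inf).1,
         (pvBfsA (pvGraph n edges).1 t p inf).2.1,
         cnt + (pvBfsA (pvGraph n edges).1 t p inf).2.2) := rfl
  have hbfs : pvBfsA (pvGraph n edges).1 t p inf
      = pvBfsLoopA (pvGraph n edges).1 t (inf.length + 2 * p.length + 1) inf p inf 0 := by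
    unfold pvBfsA
    rw [pvMark_noop inf p hmark]
  have hinv0 : pvInvA edges t (n + 1).toNat p (p, inf, inf, 0) := by
    refine ⟨hl, fun c h => h, fun c h => pvReach.base c h, hiv, by simp, hiv, hic⟩
  have hv0 : ∀ c, p.getD c false = true →
      (∀ d, pvRel edges t (n + 1).toNat c d → p.getD d false = true) ∨
      ∃ x ∈ inf, PySem.List.pyIdx? (n + 1).toNat x = some c :=
    fun c h => Or.inr (hic c h)
  have hpot : inf.length + 2 * ((n + 1).toNat - p.count true)
      ≤ inf.length + 2 * p.length + 1 := by
    have := List.count_le_length (l := p) (a := true)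
    omega
  obtain ⟨hgood, hfinv⟩ :=
    pvLoopA_good p (pvGraph_length n edges he)
      (fun c nb hmem ht => pvG_mem1 he hmem ht)
      (fun c d hrel => pvG_mem2 he hrel)
      (inf.length + 2 * p.length + 1) inf p inf 0 hinv0 hv0 hpot
  have hgoodB := pvCloseB_good edges t (n + 1).toNat p he hl
  have heq : (pvBfsLoopA (pvGraph n edges).1 t (inf.length + 2 * p.length + 1) inf p inf 0).1
      = pvCloseB t edges p := pvGood_unique hgood hgoodB
  obtain ⟨flen, _, _, _, fcnt, fiv, fic⟩ := hfinv
  refine ⟨by rw [happ, hbfs]; exact heq, ?_⟩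
  rw [happ, hbfs]
  refine ⟨flen, ?_, fiv, fic⟩
  dsimp only at fcnt ⊢
  rw [fcnt, hcnt]
  ring

theorem pvDfs_eq (n : Int) (edges : List (Int × Int × Int))
    (he : pvEOK edges (n + 1).toNat) (types : List Int) :
    ∀ (r : Nat) (best : Int) (p : List Bool) (inf : List Int) (cnt : Int),
    pvOut (n + 1).toNat p inf cnt →
    (pvProduct types r).foldl (fun mx seq =>
        max mx ((seq.foldl (pvApplyA (pvGraph n edges).1) (p, inf, cnt)).2.2)) best
      = pvDfsB edges types r best p := by
  intro r
  induction r with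
  | zero =>
    intro best p inf cnt hout
    rw [show pvProduct types 0 = [[]] from rfl,
        show pvDfsB edges types 0 best p = max best ((p.count true : Int)) from rfl]
    simp only [List.foldl_cons, List.foldl_nil]
    rw [hout.2.1]
  | succ m ih =>
    intro best p inf cnt hout
    rw [pvProduct, pvDfsB, List.foldl_flatMap]
    refine PySem.List.foldl_congr_mem types _ _ best ?_
    intro acc t _
    rw [List.foldl_map]
    obtain ⟨heq, hout'⟩ := pvWaveA n edges t he p inf cnt hout
    have hsplit : pvApplyA (pvGraph n edges).1 (p, inf, cnt) t
        = (pvCloseB t edges p,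
           (pvApplyA (pvGraph n edges).1 (p, inf, cnt) t).2.1,
           (pvApplyA (pvGraph n edges).1 (p, inf, cnt) t).2.2) := by
      rw [← heq]
    rw [heq] at hout'
    simp only [List.foldl_cons]
    rw [hsplit]
    exact ih acc (pvCloseB t edges p)
      (pvApplyA (pvGraph n edges).1 (p, inf, cnt) t).2.1
      (pvApplyA (pvGraph n edges).1 (p, inf, cnt) t).2.2 hout'

-- ===== VERDICT (by name: the statement is the Claim_ definition above) =====
theorem solution_spec : Claim_equal_solution := by
  intro n infection edges k _hdom hpre
  obtain ⟨hk, hinf, he⟩ := hpre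
  unfold Spec_solution solution solution_alt
  dsimp only
  rw [pvGraph_types]
  have hrep : (List.range (n + 1).toNat).map (fun _ => false)
      = List.replicate (n + 1).toNat false := by
    apply List.eq_replicate_iff.mpr
    constructor
    · simp
    · intro b hb
      simp only [List.mem_map] at hb
      obtain ⟨_, _, hb⟩ := hb
      exact hb.symm
  have hinit : PySem.List.pySetD (List.replicate (n + 1).toNat false) infection true
      = pvInitP n infection := by
    unfold pvInitP
    rw [hrep]
  rw [hinit]
  obtain ⟨ci, hci⟩ := pvIdx_of_inRange hinf
  have hciL : ci < (n + 1).toNat := pvIdx_lt hci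
  have hall : ((List.range (n + 1).toNat).map (fun _ => false)).length = (n + 1).toNat := by
    simp
  have hpinit : pvInitP n infection
      = ((List.range (n + 1).toNat).map (fun _ => false)).set ci true := by
    unfold pvInitP
    exact pvSetD_cell (by rw [hall]; exact hci)
  have hzero : ∀ c : Nat, ((List.range (n + 1).toNat).map (fun _ => false)).getD c false
      = false := by
    intro c
    simp [List.getD_eq_getElem?_getD]
  have hget : ∀ c, (pvInitP n infection).getD c false = if c = ci then true else false := by
    intro c
    rw [hpinit, pvGetD_set]
    by_cases h : c = ci
    · simp [h, hciL]
    · simp [h]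
  have hout0 : pvOut (n + 1).toNat (pvInitP n infection) [infection] 1 := by
    refine ⟨by rw [hpinit]; simp, ?_, ?_, ?_⟩
    · rw [hpinit, pvCount_set_true (by rw [hall]; exact hciL)]
      rw [hzero ci]
      simp [List.count_replicate]
    · intro x hx
      have : x = infection := by simpa using hx
      subst this
      exact ⟨ci, hci, by rw [hget]; simp⟩
    · intro c hc
      rw [hget] at hc
      by_cases h : c = ci
      · subst h; exact ⟨infection, by simp, hci⟩
      · rw [if_neg h] at hc; exact absurd hc (by simp)
  exact pvDfs_eq n edges he (PySem.Set.ofList (edges.map (fun e => e.2.2)))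
    k.toNat 0 (pvInitP n infection) [infection] 1 hout0
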